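-- pv_equiv track=rewrite | github.com/joestalker1/leetcode | src/main/scala/algorithms/Tree.py | toLeaf
-- ===== SOURCE A (Python) =====
-- def countNodes(adj, s, p, count):
--     count[s] = 1
--     for u in adj[s]:
--         if u == p:
--             continue
--         countNodes(adj, u, s, count)
--         count[s] += count[u]
--
-- def toLeaf(adj, x):
--     n = len(adj)
--     count = [0] * n
--     countNodes(adj, x, -1, count)
--     max_count = 0
--     for u in adj[x]:
--         if count[u] > max_count:
--             max_count = count[u]
--     return max_count
-- ===== SOURCE B (Python) =====
-- def toLeaf(adj, x):
--     n = len(adj)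
--     count = [0] * n
--     count[x] = 1
--     # iterative post-order DFS over an explicit stack of (is_exit, vertex, parent) frames;
--     # -1 is the root's "no parent" marker, as in the recursive original's root call
--     stack = [(False, u, x) for u in reversed(adj[x]) if u != -1]
--     while stack:
--         is_exit, s, p = stack.pop()
--         if is_exit:
--             count[p] += count[s]
--         else:
--             count[s] = 1
--             stack.append((True, s, p))
--             for u in reversed(adj[s]):
--                 if u != p:
--                     stack.append((False, u, s))
--     best = 0
--     for u in adj[x]:
--         best = max(best, count[u])
--     return best
-- ===== Notes on version B (the rewrite author's own statement) =====
-- stated objective: alternative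
-- what changed: A's recursive DFS (helper mutating a shared count array, the caller adding count[u] into count[s] after each child call) is replaced by an iterative post-order traversal over an explicit stack of enter/exit frames: enter frames set count[s]=1 and push the non-parent children, exit frames fold the child's count into its parent; the final scan uses max().
import Mathlib
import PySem

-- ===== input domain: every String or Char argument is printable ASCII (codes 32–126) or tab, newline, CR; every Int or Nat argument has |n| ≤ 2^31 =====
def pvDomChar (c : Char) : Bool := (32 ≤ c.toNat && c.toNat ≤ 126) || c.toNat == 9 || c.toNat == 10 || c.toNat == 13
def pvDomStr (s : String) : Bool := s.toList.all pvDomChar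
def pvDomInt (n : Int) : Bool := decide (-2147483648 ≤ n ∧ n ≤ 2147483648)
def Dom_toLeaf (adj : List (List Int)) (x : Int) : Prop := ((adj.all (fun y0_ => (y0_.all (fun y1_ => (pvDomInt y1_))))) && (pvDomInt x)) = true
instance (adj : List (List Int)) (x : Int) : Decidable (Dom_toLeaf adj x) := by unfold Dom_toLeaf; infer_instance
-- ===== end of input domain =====

-- B replaces A's recursive DFS by an iterative post-order traversal over an explicit
-- stack of enter/exit frames (same cost, no Python call-stack recursion): objective 'alternative'.

-- ===== PORT A =====
-- shared index helpers (Python list read/write with negative-index wraparound)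
def pvRow (adj : List (List Int)) (s : Int) : List Int := PySem.List.pyGetD adj s []
def pvC (cnt : List Int) (i : Int) : Int := PySem.List.pyGetD cnt i 0
def pvSet (cnt : List Int) (i : Int) (v : Int) : List Int := PySem.List.pySetD cnt i v

-- gas for the totality guard of both ports: an upper bound on the number of node visits
-- of any terminating run (never exhausted on a Pre_ input)
def pvGas (adj : List (List Int)) : Nat :=
  (adj.flatten.length + 2) ^ ((2 * adj.length + 1) ^ 2 + 4)

-- countNodes(adj, s, p, count), fueled: `g` is the gas (one unit per node visit, a pure
-- totality guard), `b` a structural recursion bound with g ≤ b.  As in Python, the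
-- caller performs `count[s] += count[u]` after each child call (in pvChildren).
-- Returns the updated count array and the remaining gas; none = gas exhausted.
mutual
def pvVisit (b g : Nat) (adj : List (List Int)) (s p : Int) (cnt : List Int) :
    Option (List Int × Nat) :=
  match b, g with
  | 0, _ => none
  | _ + 1, 0 => none
  | b + 1, g + 1 => pvChildren b (pvRow adj s) adj s p (pvSet cnt s 1) g
termination_by (b, 0)

-- the `for u in adj[s]` loop of countNodes, including the caller-side count[s] += count[u]
def pvChildren (b : Nat) (l : List Int) (adj : List (List Int)) (s p : Int)
    (cnt : List Int) (g : Nat) : Option (List Int × Nat) :=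
  match l with
  | [] => some (cnt, g)
  | u :: rest =>
    if u == p then pvChildren b rest adj s p cnt g
    else
      match pvVisit b g adj u s cnt with
      | none => none
      | some (c', g') => pvChildren b rest adj s p (pvSet c' s (pvC c' s + pvC c' u)) g'
termination_by (b, l.length + 1)
end

def toLeaf (adj : List (List Int)) (x : Int) : Int :=
  let n := adj.length
  let count := List.replicate n (0 : Int)
  match pvVisit (pvGas adj + 1) (pvGas adj + 1) adj x (-1) count with
  | none => 0      -- gas exhausted: unreachable on Pre_ inputs
  | some (cnt, _) =>
    (pvRow adj x).foldl (fun mx u => if pvC cnt u > mx then pvC cnt u else mx) 0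

-- ===== PORT B =====
-- explicit stack frames: enter u p (visit u, coming from p) / exit u p (post-order: add count[u] into count[p])
inductive PvFrame where
  | enter : Int → Int → PvFrame
  | exit : Int → Int → PvFrame
deriving DecidableEq, Repr

-- the while-stack loop of B; gas is consumed once per enter frame (totality guard only)
def pvRun (adj : List (List Int)) (gas : Nat) (st : List PvFrame) (cnt : List Int) :
    Option (List Int) :=
  match gas, st with
  | _, [] => some cnt
  | gas, .exit s p :: rest =>
    pvRun adj gas rest (pvSet cnt p (pvC cnt p + pvC cnt s))
  | 0, .enter _ _ :: _ => none
  | g + 1, .enter s p :: rest =>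
    pvRun adj g
      (((pvRow adj s).filter (fun u => u != p)).map (fun u => PvFrame.enter u s)
        ++ PvFrame.exit s p :: rest)
      (pvSet cnt s 1)
termination_by (gas, st.length)

def toLeaf_alt (adj : List (List Int)) (x : Int) : Int :=
  let n := adj.length
  let count := pvSet (List.replicate n (0 : Int)) x 1
  -- seed the stack with the root's children (-1 = the root's no-parent marker, as in A)
  let st0 := ((pvRow adj x).filter (fun u => u != (-1 : Int))).map
    (fun u => PvFrame.enter u x)
  match pvRun adj (pvGas adj) st0 count with
  | none => 0      -- gas exhausted: unreachable on Pre_ inputs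
  | some cnt => (pvRow adj x).foldl (fun mx u => max mx (pvC cnt u)) 0

-- ===== PRECONDITION & SPEC =====
-- Pre_ helpers: states of A's non-backtracking walk are pairs (parent label, current label);
-- pvSucc expands a state through the current vertex's (wrapped-index) row, blocking the
-- parent label; pvReach is the closure from the start state (-1, x).
def pvInR (n : Nat) (v : Int) : Bool := decide (-(n : Int) ≤ v ∧ v < (n : Int))

def pvSucc (adj : List (List Int)) (st : Int × Int) : List (Int × Int) :=
  if pvInR adj.length st.2 then
    ((pvRow adj st.2).filter (fun u => u ≠ st.1)).map (fun u => (st.2, u))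
  else []

def pvK (adj : List (List Int)) : Nat := (2 * adj.length + 1) ^ 2 + adj.flatten.length + 2

def pvReach (adj : List (List Int)) (x : Int) : List (Int × Int) :=
  (List.range (pvK adj)).foldl (fun R _ => (R ++ R.flatMap (pvSucc adj)).dedup) [(-1, x)]

-- Pre_: exactly the inputs on which Python A returns normally: x is a valid (possibly
-- negative, wrapping) index, every vertex label met by the parent-blocked walk from x is a
-- valid index (else IndexError), and no state of that walk can recur (else infinite
-- recursion / RecursionError).
def Pre_toLeaf (adj : List (List Int)) (x : Int) : Prop :=
  0 < adj.length ∧ pvInR adj.length x = true ∧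
  (∀ st ∈ pvReach adj x, pvInR adj.length st.2 = true) ∧
  ((List.range (pvK adj)).foldl
      (fun A _ => A.filter (fun st => (pvSucc adj st).any (fun y => decide (y ∈ A))))
      (pvReach adj x)) = []
instance (adj : List (List Int)) (x : Int) : Decidable (Pre_toLeaf adj x) := by
  unfold Pre_toLeaf; infer_instance

def pvWitness_toLeaf : List (List Int) × Int := ([[1], [0]], 0)

def Spec_toLeaf (adj : List (List Int)) (x : Int) (out : Int) : Prop := out = toLeaf_alt adj x
instance (adj : List (List Int)) (x : Int) (out : Int) : Decidable (Spec_toLeaf adj x out) := by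
  unfold Spec_toLeaf; infer_instance

-- ===== CLAIM (what is proved, stated in full; the proofs are below) =====
def Claim_equal_toLeaf : Prop :=
  ∀ (adj : List (List Int)) (x : Int), Dom_toLeaf adj x → Pre_toLeaf adj x →
    Spec_toLeaf adj x (toLeaf adj x)

-- ===== LEMMAS AND PROOFS =====

-- gas monotonicity of the A-side recursion
theorem pvGasLe (b : Nat) :
    (∀ g adj s p cnt c' g', pvVisit b g adj s p cnt = some (c', g') → g' ≤ g) ∧
    (∀ l g adj s p cnt c' g', pvChildren b l adj s p cnt g = some (c', g') → g' ≤ g) := by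
  induction b with
  | zero =>
    constructor
    · intro g adj s p cnt c' g' h; simp [pvVisit] at h
    · intro l g adj s p cnt c' g' h
      induction l generalizing cnt g with
      | nil => simp [pvChildren] at h; omega
      | cons u rest ih =>
        simp only [pvChildren] at h
        split at h
        · exact ih g cnt h
        · simp [pvVisit] at h
  | succ b ih =>
    have hvis : ∀ g adj s p cnt c' g',
        pvVisit (b + 1) g adj s p cnt = some (c', g') → g' ≤ g := by
      intro g adj s p cnt c' g' h
      cases g with
      | zero => simp [pvVisit] at h
      | succ g0 =>
        simp only [pvVisit] at h
        have := ih.2 _ _ _ _ _ _ _ _ h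
        omega
    refine ⟨hvis, ?_⟩
    intro l g adj s p cnt c' g' h
    induction l generalizing cnt g with
    | nil => simp [pvChildren] at h; omega
    | cons u rest ihl =>
      simp only [pvChildren] at h
      split at h
      · exact ihl g cnt h
      · cases hv : pvVisit (b + 1) g adj u s cnt with
        | none => rw [hv] at h; simp at h
        | some r =>
          rw [hv] at h
          have h1 : r.2 ≤ g := hvis _ _ _ _ _ _ _ hv
          have h2 := ihl r.2 _ h
          omega

-- main simulation lemma: the stack machine performs exactly the recursion's operations,
-- in the same order, consuming the same gas
theorem pvSim (adj : List (List Int)) (b : Nat) :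
    (∀ g s p cnt rest, g ≤ b →
      pvRun adj g (PvFrame.enter s p :: rest) cnt =
        match pvVisit b g adj s p cnt with
        | none => none
        | some (c', g') => pvRun adj g' rest (pvSet c' p (pvC c' p + pvC c' s))) ∧
    (∀ l g s p cnt rest, g ≤ b →
      pvRun adj g ((l.filter (fun u => u != p)).map (fun u => PvFrame.enter u s) ++ rest) cnt =
        match pvChildren b l adj s p cnt g with
        | none => none
        | some (c1, g1) => pvRun adj g1 rest c1) := by
  induction b with
  | zero =>
    have hv : ∀ g s p cnt rest, g ≤ 0 →
        pvRun adj g (PvFrame.enter s p :: rest) cnt =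
          match pvVisit 0 g adj s p cnt with
          | none => none
          | some (c', g') => pvRun adj g' rest (pvSet c' p (pvC c' p + pvC c' s)) := by
      intro g s p cnt rest hg
      have : g = 0 := by omega
      subst this
      simp [pvRun, pvVisit]
    refine ⟨hv, ?_⟩
    intro l g s p cnt rest hg
    have : g = 0 := by omega
    subst this
    induction l generalizing cnt with
    | nil => simp [pvChildren]
    | cons u rest' ihl =>
      simp only [pvChildren]
      by_cases hu : u = p
      · simp [hu, ihl]
      · have hne : (u != p) = true := by simp [hu]
        simp only [List.filter_cons, hne, if_pos, List.map_cons, List.cons_append]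
        rw [hv 0 u s cnt _ (le_refl 0)]
        simp [pvVisit, hu]
  | succ b ih =>
    have hv : ∀ g s p cnt rest, g ≤ b + 1 →
        pvRun adj g (PvFrame.enter s p :: rest) cnt =
          match pvVisit (b + 1) g adj s p cnt with
          | none => none
          | some (c', g') => pvRun adj g' rest (pvSet c' p (pvC c' p + pvC c' s)) := by
      intro g s p cnt rest hg
      cases g with
      | zero => simp [pvRun, pvVisit]
      | succ g0 =>
        simp only [pvRun, pvVisit]
        rw [ih.2 (pvRow adj s) g0 s p (pvSet cnt s 1) (PvFrame.exit s p :: rest) (by omega)]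
        cases hc : pvChildren b (pvRow adj s) adj s p (pvSet cnt s 1) g0 with
        | none => simp
        | some r =>
          rcases r with ⟨c1, g1⟩
          simp only
          rw [pvRun]
    refine ⟨hv, ?_⟩
    intro l g s p cnt rest hg
    induction l generalizing cnt g with
    | nil => simp [pvChildren]
    | cons u rest' ihl =>
      simp only [pvChildren]
      by_cases hu : u = p
      · simp only [hu, beq_self_eq_true, if_pos]
        have hne : (p != p) = false := by simp
        simp only [List.filter_cons, hne, Bool.false_eq_true, if_neg, not_false_iff]
        exact ihl g cnt hg
      · have hne : (u != p) = true := by simp [hu]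
        simp only [List.filter_cons, hne, if_pos, List.map_cons, List.cons_append]
        rw [hv g u s cnt _ hg]
        cases hvis : pvVisit (b + 1) g adj u s cnt with
        | none => simp [hu]
        | some r =>
          rcases r with ⟨c', g'⟩
          have hg' : g' ≤ g := (pvGasLe (b + 1)).1 _ _ _ _ _ _ _ hvis
          simp only [beq_iff_eq, hu, if_false]
          exact ihl g' _ (by omega)

-- the two final scans agree: A's strict-greater update is foldl max
theorem pvFoldMax (l : List Int) (cnt : List Int) (m : Int) :
    l.foldl (fun mx u => if pvC cnt u > mx then pvC cnt u else mx) m =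
      l.foldl (fun mx u => max mx (pvC cnt u)) m := by
  induction l generalizing m with
  | nil => rfl
  | cons u rest ih =>
    simp only [List.foldl_cons]
    rw [ih]
    congr 1
    rcases le_or_gt (pvC cnt u) m with h | h
    · rw [if_neg (by omega), max_eq_left h]
    · rw [if_pos (by omega), max_eq_right (by omega)]

-- ===== VERDICT (by name: the statement is the Claim_ definition above) =====
theorem toLeaf_spec : Claim_equal_toLeaf := by
  intro adj x _ _
  unfold Spec_toLeaf toLeaf toLeaf_alt
  simp only [pvVisit]
  have hs := (pvSim adj (pvGas adj)).2 (pvRow adj x) (pvGas adj) x (-1)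
        (pvSet (List.replicate adj.length 0) x 1) [] (le_refl _)
  rw [List.append_nil] at hs
  rw [hs]
  cases h : pvChildren (pvGas adj) (pvRow adj x) adj x (-1)
      (pvSet (List.replicate adj.length 0) x 1) (pvGas adj) with
  | none => simp
  | some r =>
    rcases r with ⟨cnt, g'⟩
    simp only [pvRun]
    rw [pvFoldMax]
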